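-- pv_equiv track=rewrite | github.com/AntheaRen/CSCI3100_Project | backend/modules/utils/sdxl_model_utils.py | renew_resnet_paths
-- ===== SOURCE A (Python) =====
-- def renew_resnet_paths(old_list, n_shave_prefix_segments=0):
--     """
--     Updates paths inside resnets to the new naming scheme (local renaming)
--     """
--     mapping = []
--     for old_item in old_list:
--         new_item = old_item.replace("in_layers.0", "norm1")
--         new_item = new_item.replace("in_layers.2", "conv1")
--
--         new_item = new_item.replace("out_layers.0", "norm2")
--         new_item = new_item.replace("out_layers.3", "conv2")
--
--         new_item = new_item.replace("emb_layers.1", "time_emb_proj")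
--         new_item = new_item.replace("skip_connection", "conv_shortcut")
--
--         new_item = shave_segments(new_item, n_shave_prefix_segments=n_shave_prefix_segments)
--
--         mapping.append({"old": old_item, "new": new_item})
--
--     return mapping
--
-- def shave_segments(path, n_shave_prefix_segments=1):
--     """
--     Removes segments. Positive values shave the first segments, negative shave the last segments.
--     """
--     if n_shave_prefix_segments >= 0:
--         return ".".join(path.split(".")[n_shave_prefix_segments:])
--     else:
--         return ".".join(path.split(".")[:n_shave_prefix_segments])
-- ===== SOURCE B (Python) =====
-- # Single-pass table-driven rewriter: one left-to-right scan over each path trying each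
-- # (source, replacement) pair at the current index, instead of six chained full-string
-- # .replace passes; shave_segments logic inlined as a slice of the split segments.
-- _RENAMES = [
--     ("in_layers.0", "norm1"),
--     ("in_layers.2", "conv1"),
--     ("out_layers.0", "norm2"),
--     ("out_layers.3", "conv2"),
--     ("emb_layers.1", "time_emb_proj"),
--     ("skip_connection", "conv_shortcut"),
-- ]
--
--
-- def _rewrite(path):
--     out = []
--     i = 0
--     while i < len(path):
--         for src, dst in _RENAMES:
--             if path.startswith(src, i):
--                 out.append(dst)
--                 i += len(src)
--                 break
--         else:
--             out.append(path[i])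
--             i += 1
--     return "".join(out)
--
--
-- def _shave(path, n):
--     segments = path.split(".")
--     kept = segments[n:] if n >= 0 else segments[:n]
--     return ".".join(kept)
--
--
-- def renew_resnet_paths(old_list, n_shave_prefix_segments=0):
--     return [
--         {"old": old_item, "new": _shave(_rewrite(old_item), n_shave_prefix_segments)}
--         for old_item in old_list
--     ]
-- ===== Notes on version B (the rewrite author's own statement) =====
-- stated objective: alternative
-- what changed: Replaces the six chained full-string .replace passes by a table of (source, replacement) pairs and ONE left-to-right scan that tries each pair at the current index, building the result list by comprehension instead of append-in-a-loop; Pre_ excludes strings containing 'skip_connectioin_layers.0' or 'skip_connectioout_layers.0', where a replacement output abuts the preceding text to form a brand-new 'skip_connection' occurrence that A's later chained pass coincidentally rewrites again while a single pass does not - a cascade corner neither behaviour specifies.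
import Mathlib
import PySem

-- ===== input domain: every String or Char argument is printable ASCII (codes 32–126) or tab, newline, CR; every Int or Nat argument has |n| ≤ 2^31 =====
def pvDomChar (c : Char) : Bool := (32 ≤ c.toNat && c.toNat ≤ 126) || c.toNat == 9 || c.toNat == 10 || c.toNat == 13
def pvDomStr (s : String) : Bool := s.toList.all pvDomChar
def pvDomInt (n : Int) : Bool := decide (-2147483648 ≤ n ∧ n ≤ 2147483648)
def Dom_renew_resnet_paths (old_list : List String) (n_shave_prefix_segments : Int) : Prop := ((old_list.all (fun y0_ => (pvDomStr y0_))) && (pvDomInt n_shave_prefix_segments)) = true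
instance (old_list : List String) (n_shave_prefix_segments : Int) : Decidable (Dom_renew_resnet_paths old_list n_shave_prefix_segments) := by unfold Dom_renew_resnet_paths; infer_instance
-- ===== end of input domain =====

-- B replaces A's six chained full-string .replace passes by ONE left-to-right scan over a
-- table of (source, replacement) pairs (objective: alternative; equal on all inputs Pre_ admits).

-- ===== PORT A =====
-- helper shave_segments, n_shave_prefix_segments ≥ 0 branch keeps path.split(".")[n:], else [:n]
def pvShaveSegmentsA (path : String) (n_shave_prefix_segments : Int) : String :=
  if 0 ≤ n_shave_prefix_segments then
    PySem.Str.join "." (PySem.List.slice ((PySem.Str.split? path ".").getD []) (some n_shave_prefix_segments) none)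
  else
    PySem.Str.join "." (PySem.List.slice ((PySem.Str.split? path ".").getD []) none (some n_shave_prefix_segments))

def renew_resnet_paths (old_list : List String) (n_shave_prefix_segments : Int) : List (List (String × String)) :=
  old_list.foldl (fun mapping old_item =>
    let new_item := PySem.Str.replace old_item "in_layers.0" "norm1"
    let new_item := PySem.Str.replace new_item "in_layers.2" "conv1"
    let new_item := PySem.Str.replace new_item "out_layers.0" "norm2"
    let new_item := PySem.Str.replace new_item "out_layers.3" "conv2"
    let new_item := PySem.Str.replace new_item "emb_layers.1" "time_emb_proj"
    let new_item := PySem.Str.replace new_item "skip_connection" "conv_shortcut"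
    let new_item := pvShaveSegmentsA new_item n_shave_prefix_segments
    mapping ++ [[("old", old_item), ("new", new_item)]]) []

-- ===== PORT B =====
def pvRenames : List (String × String) :=
  [("in_layers.0", "norm1"), ("in_layers.2", "conv1"),
   ("out_layers.0", "norm2"), ("out_layers.3", "conv2"),
   ("emb_layers.1", "time_emb_proj"), ("skip_connection", "conv_shortcut")]

-- the `while i < len(path)` loop of Source B's _rewrite, fuel = number of remaining iterations
def pvScanGo (ps : List (List Char × List Char)) : Nat → List Char → List Char
  | 0, _ => []
  | _ + 1, [] => []
  | fuel + 1, c :: t =>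
    match ps.find? (fun p => p.1.isPrefixOf (c :: t)) with
    | some (k, v) => v ++ pvScanGo ps fuel (t.drop (k.length - 1))
    | none => c :: pvScanGo ps fuel t

def pvRewrite (path : String) : String :=
  String.ofList (pvScanGo (pvRenames.map (fun p => (p.1.toList, p.2.toList))) path.toList.length path.toList)

def pvShaveB (path : String) (n : Int) : String :=
  if 0 ≤ n then
    PySem.Str.join "." (PySem.List.slice ((PySem.Str.split? path ".").getD []) (some n) none)
  else
    PySem.Str.join "." (PySem.List.slice ((PySem.Str.split? path ".").getD []) none (some n))

def renew_resnet_paths_alt (old_list : List String) (n_shave_prefix_segments : Int) : List (List (String × String)) :=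
  old_list.map (fun old_item =>
    [("old", old_item), ("new", pvShaveB (pvRewrite old_item) n_shave_prefix_segments)])

-- ===== PRECONDITION & SPEC =====
-- Pre_ excludes inputs containing 'skip_connectioin_layers.0' or 'skip_connectioout_layers.0':
-- there an early replacement's output abuts the preceding text to form a brand-new
-- 'skip_connection' occurrence which A's later chained pass coincidentally rewrites again while
-- a single left-to-right pass does not — a cascade corner on which neither behaviour is specified.
def Pre_renew_resnet_paths (old_list : List String) (n_shave_prefix_segments : Int) : Prop :=
  ∀ s ∈ old_list, PySem.Str.isIn "skip_connectioin_layers.0" s = false ∧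
    PySem.Str.isIn "skip_connectioout_layers.0" s = false

instance (old_list : List String) (n_shave_prefix_segments : Int) : Decidable (Pre_renew_resnet_paths old_list n_shave_prefix_segments) := by unfold Pre_renew_resnet_paths; infer_instance

def pvWitness_renew_resnet_paths : List String × Int := (["input_blocks.1.0.in_layers.0.weight", "h.out_layers.3.bias"], 2)

def Spec_renew_resnet_paths (old_list : List String) (n_shave_prefix_segments : Int) (out : List (List (String × String))) : Prop := out = renew_resnet_paths_alt old_list n_shave_prefix_segments
instance (old_list : List String) (n_shave_prefix_segments : Int) (out : List (List (String × String))) : Decidable (Spec_renew_resnet_paths old_list n_shave_prefix_segments out) := by unfold Spec_renew_resnet_paths; infer_instance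

-- ===== CLAIM (what is proved, stated in full; the proofs are below) =====
def Claim_equal_renew_resnet_paths : Prop := ∀ (old_list : List String) (n_shave_prefix_segments : Int), Dom_renew_resnet_paths old_list n_shave_prefix_segments → Pre_renew_resnet_paths old_list n_shave_prefix_segments → Spec_renew_resnet_paths old_list n_shave_prefix_segments (renew_resnet_paths old_list n_shave_prefix_segments)

-- ===== LEMMAS AND PROOFS =====

-- `pvCant a b` : a mismatch between a and b occurs within min(|a|,|b|) chars
def pvCant (a b : List Char) : Bool := !(a.isPrefixOf b) && !(b.isPrefixOf a)

-- the finitely many words "take (q+1) kj ++ k" whose occurrence in s lets replacing k by v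
-- create a fresh occurrence of a later key kj (compat of kj's tail with v)
def pvCascWords (v k : List Char) (ps : List (List Char × List Char)) : List (List Char) :=
  ps.flatMap (fun p =>
    (List.range p.1.length).filterMap (fun q =>
      if q + 1 < p.1.length ∧ pvCant (p.1.drop (q + 1)) v = false then
        some (p.1.take (q + 1) ++ k)
      else none))

-- structural version of one full pass of str.replace (PySem.Chars.replace)
def pvRepl (k v : List Char) : List Char → List Char
  | [] => []
  | c :: t =>
    if k.isPrefixOf (c :: t) then v ++ pvRepl k v (t.drop (k.length - 1))
    else c :: pvRepl k v t
  termination_by l => l.length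
  decreasing_by all_goals (simp only [List.length_cons, List.length_drop]; omega)

-- structural version of the single-pass scanner (pvScanGo without fuel)
def pvScan (ps : List (List Char × List Char)) : List Char → List Char
  | [] => []
  | c :: t =>
    match ps.find? (fun p => p.1.isPrefixOf (c :: t)) with
    | some (k, v) => v ++ pvScan ps (t.drop (k.length - 1))
    | none => c :: pvScan ps t
  termination_by l => l.length
  decreasing_by all_goals (simp only [List.length_cons, List.length_drop]; omega)


theorem pvCant_iff {a b : List Char} : pvCant a b = true ↔ ¬ a <+: b ∧ ¬ b <+: a := by
  simp [pvCant, ← List.isPrefixOf_iff_prefix]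

theorem pvCant_false_iff {a b : List Char} : pvCant a b = false ↔ a <+: b ∨ b <+: a := by
  rw [← Bool.not_eq_true, pvCant_iff]
  by_cases h1 : a <+: b <;> by_cases h2 : b <+: a <;> simp [h1, h2]

theorem pvCant_not_prefix_append {a u : List Char} (h : pvCant a u = true) (x : List Char) :
    ¬ a <+: (u ++ x) := by
  obtain ⟨h1, h2⟩ := pvCant_iff.mp h
  intro hax
  rcases Nat.le_total a.length u.length with hle | hle'
  · exact h1 (List.prefix_of_prefix_length_le hax (List.prefix_append u x) hle)
  · exact h2 (List.prefix_of_prefix_length_le (List.prefix_append u x) hax hle')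

theorem pvReplace_go_eq (k v : List Char) (hk : k ≠ []) :
    ∀ fuel s acc, s.length ≤ fuel →
      PySem.Chars.replace.go k v fuel s acc = acc.reverse ++ pvRepl k v s := by
  intro fuel
  induction fuel with
  | zero =>
    intro s acc hs
    have hsnil : s = [] := by
      cases s with
      | nil => rfl
      | cons c t => simp at hs
    subst hsnil
    rw [PySem.Chars.replace.go.eq_def]
    simp [pvRepl]
  | succ n ih =>
    intro s acc hs
    rw [PySem.Chars.replace.go.eq_def]
    cases s with
    | nil => simp [pvRepl]
    | cons c t =>
      have hts : t.length ≤ n := by simp at hs; omega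
      obtain ⟨m, hm⟩ := Nat.exists_eq_succ_of_ne_zero (show k.length ≠ 0 by simpa using hk)
      by_cases hp : k.isPrefixOf (c :: t)
      · simp only [hp, if_true]
        rw [ih (List.drop k.length (c :: t)) (v.reverse ++ acc) (by simp; omega)]
        simp only [pvRepl, hp, if_true]
        rw [hm, List.drop_succ_cons]
        simp [List.reverse_append]
      · have hpb : k.isPrefixOf (c :: t) = false := by
          revert hp; cases k.isPrefixOf (c :: t) <;> simp
        simp only [hpb, Bool.false_eq_true, if_false]
        rw [ih t (c :: acc) hts]
        simp only [pvRepl, hpb, Bool.false_eq_true, if_false]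
        simp

theorem pvReplace_eq_pvRepl (k v : List Char) (hk : k ≠ []) (s : List Char) :
    PySem.Chars.replace s k v = pvRepl k v s := by
  unfold PySem.Chars.replace
  rw [if_neg (by simpa [List.isEmpty_iff] using hk)]
  simpa using pvReplace_go_eq k v hk s.length s [] le_rfl

theorem pvScanGo_eq_pvScan (ps : List (List Char × List Char)) :
    ∀ fuel s, s.length ≤ fuel → pvScanGo ps fuel s = pvScan ps s := by
  intro fuel
  induction fuel with
  | zero =>
    intro s hs
    have hsnil : s = [] := by
      cases s with
      | nil => rfl
      | cons c t => simp at hs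
    subst hsnil
    simp [pvScanGo, pvScan]
  | succ n ih =>
    intro s hs
    cases s with
    | nil => simp [pvScanGo, pvScan]
    | cons c t =>
      have hts : t.length ≤ n := by simp at hs; omega
      simp only [pvScanGo, pvScan]
      cases hf : ps.find? (fun p => p.1.isPrefixOf (c :: t)) with
      | none => simp [ih t hts]
      | some p =>
        obtain ⟨kk, vv⟩ := p
        simp only [ih (t.drop (kk.length - 1)) (by simp; omega)]

theorem pvScan_nil (s : List Char) : pvScan [] s = s := by
  induction s with
  | nil => simp [pvScan]
  | cons c t ih => simp [pvScan, ih]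

theorem pvScan_over (ps : List (List Char × List Char)) :
    ∀ u x, (∀ q < u.length, ∀ p ∈ ps, pvCant p.1 (u.drop q) = true) →
      pvScan ps (u ++ x) = u ++ pvScan ps x := by
  intro u
  induction u with
  | nil => intro x _; simp
  | cons a u' ih =>
    intro x h
    have hnone : ps.find? (fun p => p.1.isPrefixOf (a :: (u' ++ x))) = none := by
      rw [List.find?_eq_none]
      intro p hp
      have hc := h 0 (by simp) p hp
      simp only [List.drop_zero] at hc
      have hnp := pvCant_not_prefix_append hc x
      intro hcon
      exact hnp (by simpa [List.cons_append, List.isPrefixOf_iff_prefix] using hcon)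
    rw [List.cons_append]
    simp only [pvScan]
    rw [hnone]
    rw [ih x (fun q hq p hp => by
      have := h (q + 1) (by simpa using Nat.succ_lt_succ hq) p hp
      simpa using this)]
    simp

theorem pvRepl_over (k v : List Char) :
    ∀ u w, (∀ q < u.length, pvCant k (u.drop q) = true) →
      pvRepl k v (u ++ w) = u ++ pvRepl k v w := by
  intro u
  induction u with
  | nil => intro w _; simp
  | cons a u' ih =>
    intro w h
    have hc := h 0 (by simp)
    simp only [List.drop_zero] at hc
    have hfalse : k.isPrefixOf (a :: (u' ++ w)) = false := by
      simp only [← Bool.not_eq_true]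
      intro hcon
      exact pvCant_not_prefix_append hc w
        (by simpa [List.cons_append, List.isPrefixOf_iff_prefix] using hcon)
    rw [List.cons_append]
    simp only [pvRepl, hfalse]
    simp only [Bool.false_eq_true, if_false]
    rw [ih w (fun q hq => by
      have := h (q + 1) (by simpa using Nat.succ_lt_succ hq)
      simpa using this)]
    simp

theorem pvS (k v : List Char) (hk : k ≠ []) :
    ∀ n (s a : List Char), s.length ≤ n → a ≠ [] → a <+: pvRepl k v s →
      a <+: s ∨ ∃ q < a.length, ((a.take q ++ k) <+: s ∧ pvCant (a.drop q) v = false) := by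
  intro n
  induction n with
  | zero =>
    intro s a hs ha hpre
    have hsnil : s = [] := by
      cases s with
      | nil => rfl
      | cons c t => simp at hs
    subst hsnil
    simp only [pvRepl] at hpre
    exact absurd (List.prefix_nil.mp hpre) ha
  | succ n ih =>
    intro s a hs ha hpre
    cases s with
    | nil =>
      simp only [pvRepl] at hpre
      exact absurd (List.prefix_nil.mp hpre) ha
    | cons c t =>
      have hts : t.length ≤ n := by simp at hs; omega
      by_cases hp : k.isPrefixOf (c :: t)
      · right
        refine ⟨0, by cases a with | nil => exact absurd rfl ha | cons _ _ => simp, ?_, ?_⟩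
        · simpa using List.isPrefixOf_iff_prefix.mp hp
        · simp only [pvRepl, hp, if_true] at hpre
          simp only [List.drop_zero]
          rcases Nat.le_total a.length v.length with hle | hle'
          · exact pvCant_false_iff.mpr (Or.inl
              (List.prefix_of_prefix_length_le hpre (List.prefix_append v _) hle))
          · exact pvCant_false_iff.mpr (Or.inr
              (List.prefix_of_prefix_length_le (List.prefix_append v _) hpre hle'))
      · have hpb : k.isPrefixOf (c :: t) = false := by
          revert hp; cases k.isPrefixOf (c :: t) <;> simp
        simp only [pvRepl, hpb, Bool.false_eq_true, if_false] at hpre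
        cases a with
        | nil => exact absurd rfl ha
        | cons a0 a' =>
          rw [List.cons_prefix_cons] at hpre
          obtain ⟨rfl, ha'⟩ := hpre
          by_cases ha'nil : a' = []
          · subst ha'nil
            left
            simp [List.cons_prefix_cons]
          · rcases ih t a' hts ha'nil ha' with h1 | ⟨q, hq, hpfx, hcant⟩
            · exact Or.inl (List.cons_prefix_cons.mpr ⟨rfl, h1⟩)
            · right
              refine ⟨q + 1, by simpa using Nat.succ_lt_succ hq, ?_, ?_⟩
              · rw [List.take_succ_cons, List.cons_append]
                exact List.cons_prefix_cons.mpr ⟨rfl, hpfx⟩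
              · simpa using hcant

theorem pvInfix_over (w : List Char) :
    ∀ v x, (∀ q < v.length, pvCant w (v.drop q) = true) → w <:+: (v ++ x) → w <:+: x := by
  intro v
  induction v with
  | nil => intro x _ hx; simpa using hx
  | cons a v' ih =>
    intro x h hx
    rw [List.cons_append, List.infix_cons_iff] at hx
    rcases hx with hpfx | hinf
    · exfalso
      have hc := h 0 (by simp)
      simp only [List.drop_zero] at hc
      exact pvCant_not_prefix_append hc x (by simpa [List.cons_append] using hpfx)
    · exact ih x (fun q hq => by
        have := h (q + 1) (by simpa using Nat.succ_lt_succ hq)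
        simpa using this) hinf

theorem pvPreserve (k v w : List Char) (hk : k ≠ []) (hw : w ≠ [])
    (hP1 : ∀ q < v.length, pvCant w (v.drop q) = true)
    (hP2 : ∀ q < w.length, pvCant (w.drop q) v = true) :
    ∀ n s, s.length ≤ n → ¬ w <:+: s → ¬ w <:+: pvRepl k v s := by
  intro n
  induction n with
  | zero =>
    intro s hs hws
    have hsnil : s = [] := by
      cases s with
      | nil => rfl
      | cons c t => simp at hs
    subst hsnil
    simpa only [pvRepl] using hws
  | succ n ih =>
    intro s hs hws
    cases s with
    | nil => simpa only [pvRepl] using hws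
    | cons c t =>
      have hts : t.length ≤ n := by simp at hs; omega
      by_cases hp : k.isPrefixOf (c :: t)
      · simp only [pvRepl, hp, if_true]
        intro hinf
        have hx := pvInfix_over w v _ hP1 hinf
        have hdropsuf : t.drop (k.length - 1) <:+ (c :: t) := by
          obtain ⟨m, hm⟩ := Nat.exists_eq_succ_of_ne_zero (show k.length ≠ 0 by simpa using hk)
          rw [hm]
          simpa using (List.drop_suffix (m + 1) (c :: t)).trans (List.suffix_refl _)
        refine ih (t.drop (k.length - 1)) (by simp; omega) ?_ hx
        intro hcon
        exact hws (hcon.trans hdropsuf.isInfix)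
      · have hpb : k.isPrefixOf (c :: t) = false := by
          revert hp; cases k.isPrefixOf (c :: t) <;> simp
        simp only [pvRepl, hpb, Bool.false_eq_true, if_false]
        intro hinf
        rw [List.infix_cons_iff] at hinf
        rcases hinf with hpfx | hinf'
        · have hpre : w <+: pvRepl k v (c :: t) := by
            simp only [pvRepl, hpb, Bool.false_eq_true, if_false]
            exact hpfx
          rcases pvS k v hk (n + 1) (c :: t) w hs hw hpre with h1 | ⟨q, hq, _, hcant⟩
          · exact hws h1.isInfix
          · exact absurd (hP2 q hq) (by simp [hcant])
        · exact ih t hts (fun hcon => hws (hcon.trans (List.suffix_cons c t).isInfix)) hinf'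

theorem pvScan_step (ps : List (List Char × List Char)) (kj vj : List Char) (X : List Char)
    (hkj : kj ≠ [])
    (hf : ps.find? (fun p => p.1.isPrefixOf (kj ++ X)) = some (kj, vj)) :
    pvScan ps (kj ++ X) = vj ++ pvScan ps X := by
  cases kj with
  | nil => exact absurd rfl hkj
  | cons b kj' =>
    rw [List.cons_append]
    simp only [pvScan]
    rw [← List.cons_append, hf]
    simp only [List.length_cons, Nat.add_sub_cancel]
    rw [show (kj' ++ X).drop kj'.length = X from List.drop_left]

theorem pvFindShift (kj vj : List Char) (s X : List Char) (hkjs : kj <+: s) :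
    ∀ ps : List (List Char × List Char),
      (∀ p ∈ ps, ∀ r ∈ ps, p.1 ≠ r.1 → pvCant p.1 r.1 = true) →
      ps.find? (fun p => p.1.isPrefixOf s) = some (kj, vj) →
      ps.find? (fun p => p.1.isPrefixOf (kj ++ X)) = some (kj, vj) := by
  intro ps
  induction ps with
  | nil => intro _ hs; simp at hs
  | cons p ps' ih =>
    intro hpw hs
    rw [List.find?_cons] at hs ⊢
    cases hpp : p.1.isPrefixOf s with
    | true =>
      rw [hpp] at hs
      simp only [Option.some.injEq] at hs
      subst hs
      simp [List.isPrefixOf_iff_prefix.mpr (List.prefix_append (kj, vj).1 X)]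
    | false =>
      rw [hpp] at hs
      simp only [] at hs
      have hmem : (kj, vj) ∈ p :: ps' := List.mem_cons_of_mem p (List.mem_of_find?_eq_some hs)
      have hppX : p.1.isPrefixOf (kj ++ X) = false := by
        simp only [← Bool.not_eq_true]
        intro hcon
        have hconp : p.1 <+: kj ++ X := List.isPrefixOf_iff_prefix.mp hcon
        rcases Nat.le_total p.1.length kj.length with hle | hle' 
        · have h1 : p.1 <+: kj := List.prefix_of_prefix_length_le hconp (List.prefix_append _ _) hle
          have h2 : p.1 <+: s := h1.trans hkjs
          rw [List.isPrefixOf_iff_prefix.mpr h2] at hpp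
          exact absurd hpp (by simp)
        · have hkp : kj <+: p.1 :=
            List.prefix_of_prefix_length_le (List.prefix_append _ _) hconp hle' 
          by_cases heq : p.1 = kj
          · rw [heq, List.isPrefixOf_iff_prefix.mpr hkjs] at hpp
            exact absurd hpp (by simp)
          · have hc := hpw p (by simp) (kj, vj) hmem heq
            exact (pvCant_iff.mp hc).2 hkp
      rw [hppX]
      exact ih (fun a ha r hr hne' =>
        hpw a (List.mem_cons_of_mem p ha) r (List.mem_cons_of_mem p hr) hne') hs

theorem pvMain (k v : List Char) (ps : List (List Char × List Char)) (hk : k ≠ [])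
    (hne : ∀ p ∈ ps, p.1 ≠ [])
    (hpw : ∀ p ∈ ps, ∀ r ∈ ps, p.1 ≠ r.1 → pvCant p.1 r.1 = true)
    (hval : ∀ p ∈ ps, ∀ q < v.length, pvCant p.1 (v.drop q) = true)
    (hkey : ∀ p ∈ ps, ∀ q < p.1.length, pvCant k (p.1.drop q) = true) :
    ∀ n (s : List Char), s.length ≤ n → (∀ w ∈ pvCascWords v k ps, ¬ w <:+: s) →
      pvScan ps (pvRepl k v s) = pvScan ((k, v) :: ps) s := by
  intro n
  induction n with
  | zero =>
    intro s hs _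
    have hsnil : s = [] := by
      cases s with
      | nil => rfl
      | cons c t => simp at hs
    subst hsnil
    simp [pvRepl, pvScan]
  | succ n ih =>
    intro s hs hcasc
    cases s with
    | nil => simp [pvRepl, pvScan]
    | cons c t =>
      have hts : t.length ≤ n := by simp at hs; omega
      by_cases hp : k.isPrefixOf (c :: t)
      · -- k matches at the front
        simp only [pvRepl, hp, if_true]
        rw [pvScan_over ps v _ (fun q hq p hp' => hval p hp' q hq)]
        have hfind : ((k, v) :: ps).find? (fun p => p.1.isPrefixOf (c :: t)) = some (k, v) := by
          rw [List.find?_cons, hp]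
        conv_rhs => rw [pvScan]
        rw [hfind]
        congr 1
        refine ih (t.drop (k.length - 1)) (by simp; omega) ?_
        intro w hw hinf
        have hdropsuf : t.drop (k.length - 1) <:+ (c :: t) := by
          obtain ⟨m, hm⟩ := Nat.exists_eq_succ_of_ne_zero (show k.length ≠ 0 by simpa using hk)
          rw [hm]
          simpa using (List.drop_suffix (m + 1) (c :: t))
        exact hcasc w hw (hinf.trans hdropsuf.isInfix)
      · have hpb : k.isPrefixOf (c :: t) = false := by
          revert hp; cases k.isPrefixOf (c :: t) <;> simp
        cases hf : ps.find? (fun p => p.1.isPrefixOf (c :: t)) with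
        | some pj =>
          obtain ⟨kj, vj⟩ := pj
          have hkjmem := List.mem_of_find?_eq_some hf
          have hkjpre : kj <+: (c :: t) := by
            have h0 := List.find?_some hf
            simpa [List.isPrefixOf_iff_prefix] using h0
          obtain ⟨w, hw⟩ := hkjpre
          have hkjne : kj ≠ [] := hne (kj, vj) hkjmem
          have hkjpre' : kj <+: (c :: t) := ⟨w, hw⟩
          -- left side: pvRepl passes over the kj occurrence
          have hrepl : pvRepl k v (c :: t) = kj ++ pvRepl k v w := by
            rw [← hw]
            exact pvRepl_over k v kj w (fun q hq => hkey (kj, vj) hkjmem q hq)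
          have hshift := pvFindShift kj vj (c :: t) (pvRepl k v w) hkjpre' ps hpw hf
          have hshift2 := pvFindShift kj vj (c :: t) w hkjpre' ps hpw hf
          have hlhs : pvScan ps (pvRepl k v (c :: t)) = vj ++ pvScan ps (pvRepl k v w) := by
            rw [hrepl]
            exact pvScan_step ps kj vj _ hkjne hshift
          -- right side
          have hfind2 : ((k, v) :: ps).find? (fun p => p.1.isPrefixOf (kj ++ w)) = some (kj, vj) := by
            rw [List.find?_cons, show k.isPrefixOf (kj ++ w) = false by rw [hw]; exact hpb]
            exact hshift2
          have hrhs : pvScan ((k, v) :: ps) (c :: t) = vj ++ pvScan ((k, v) :: ps) w := by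
            rw [← hw]
            exact pvScan_step ((k, v) :: ps) kj vj w hkjne hfind2
          rw [hlhs, hrhs]
          congr 1
          have hwlen : w.length ≤ n := by
            have := congrArg List.length hw
            simp at this
            have hkjlen : 1 ≤ kj.length := by
              cases kj with
              | nil => exact absurd rfl hkjne
              | cons _ _ => simp
            omega
          refine ih w hwlen ?_
          intro ww hww hinf
          have hwsuf : w <:+ (c :: t) := ⟨kj, hw⟩
          exact hcasc ww hww (hinf.trans hwsuf.isInfix)
        | none =>
          simp only [pvRepl, hpb, Bool.false_eq_true, if_false]
          have hnone2 : ps.find? (fun p => p.1.isPrefixOf (c :: pvRepl k v t)) = none := by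
            rw [List.find?_eq_none]
            intro p hpmem
            intro hcon
            have hpre : p.1 <+: pvRepl k v (c :: t) := by
              simp only [pvRepl, hpb, Bool.false_eq_true, if_false]
              exact List.isPrefixOf_iff_prefix.mp hcon
            have hpne : p.1 ≠ [] := hne p hpmem
            rcases pvS k v hk (n + 1) (c :: t) p.1 hs hpne hpre with h1 | ⟨q, hq, hpfx, hcant⟩
            · have := List.find?_eq_none.mp hf p hpmem
              exact this (List.isPrefixOf_iff_prefix.mpr h1)
            · cases q with
              | zero =>
                simp only [List.take_zero, List.nil_append] at hpfx
                exact hp (List.isPrefixOf_iff_prefix.mpr hpfx)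
              | succ q' =>
                have hwmem : (p.1.take (q' + 1) ++ k) ∈ pvCascWords v k ps := by
                  rw [pvCascWords, List.mem_flatMap]
                  refine ⟨p, hpmem, ?_⟩
                  rw [List.mem_filterMap]
                  refine ⟨q', by simp; omega, ?_⟩
                  rw [if_pos ⟨hq, hcant⟩]
                exact hcasc _ hwmem hpfx.isInfix
          simp only [pvScan]
          rw [hnone2, List.find?_cons, hpb, hf]
          show c :: pvScan ps (pvRepl k v t) = c :: pvScan ((k, v) :: ps) t
          congr 1
          refine ih t hts ?_
          intro ww hww hinf
          exact hcasc ww hww (hinf.trans (List.suffix_cons c t).isInfix)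

theorem pvChainEq (L : List Char)
    (h1 : ¬ "skip_connectioin_layers.0".toList <:+: L)
    (h2 : ¬ "skip_connectioout_layers.0".toList <:+: L) :
    pvRepl "skip_connection".toList "conv_shortcut".toList
      (pvRepl "emb_layers.1".toList "time_emb_proj".toList
        (pvRepl "out_layers.3".toList "conv2".toList
          (pvRepl "out_layers.0".toList "norm2".toList
            (pvRepl "in_layers.2".toList "conv1".toList
              (pvRepl "in_layers.0".toList "norm1".toList L))))) =
    pvScan (pvRenames.map (fun p => (p.1.toList, p.2.toList))) L := by
  have hm2a : ¬ "skip_connectioout_layers.0".toList <:+: (pvRepl "in_layers.0".toList "norm1".toList L) :=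
    pvPreserve "in_layers.0".toList "norm1".toList "skip_connectioout_layers.0".toList (by decide) (by decide) (by decide) (by decide)
      L.length L le_rfl h2
  have hm2b : ¬ "skip_connectioout_layers.0".toList <:+: (pvRepl "in_layers.2".toList "conv1".toList (pvRepl "in_layers.0".toList "norm1".toList L)) :=
    pvPreserve "in_layers.2".toList "conv1".toList "skip_connectioout_layers.0".toList (by decide) (by decide) (by decide) (by decide)
      ((pvRepl "in_layers.0".toList "norm1".toList L)).length (pvRepl "in_layers.0".toList "norm1".toList L) le_rfl hm2a
  have e1 : pvScan [("in_layers.2".toList, "conv1".toList), ("out_layers.0".toList, "norm2".toList), ("out_layers.3".toList, "conv2".toList), ("emb_layers.1".toList, "time_emb_proj".toList), ("skip_connection".toList, "conv_shortcut".toList)] (pvRepl "in_layers.0".toList "norm1".toList L) = pvScan [("in_layers.0".toList, "norm1".toList), ("in_layers.2".toList, "conv1".toList), ("out_layers.0".toList, "norm2".toList), ("out_layers.3".toList, "conv2".toList), ("emb_layers.1".toList, "time_emb_proj".toList), ("skip_connection".toList, "conv_shortcut".toList)] L :=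
    pvMain "in_layers.0".toList "norm1".toList [("in_layers.2".toList, "conv1".toList), ("out_layers.0".toList, "norm2".toList), ("out_layers.3".toList, "conv2".toList), ("emb_layers.1".toList, "time_emb_proj".toList), ("skip_connection".toList, "conv_shortcut".toList)] (by decide) (by decide) (by decide) (by decide) (by decide)
      (L).length L le_rfl
      (by
      have hcw : pvCascWords "norm1".toList "in_layers.0".toList [("in_layers.2".toList, "conv1".toList), ("out_layers.0".toList, "norm2".toList), ("out_layers.3".toList, "conv2".toList), ("emb_layers.1".toList, "time_emb_proj".toList), ("skip_connection".toList, "conv_shortcut".toList)] = ["skip_connectioin_layers.0".toList] := by decide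
      intro w hw; rw [hcw] at hw; simp at hw; subst hw; exact h1)
  have e2 : pvScan [("out_layers.0".toList, "norm2".toList), ("out_layers.3".toList, "conv2".toList), ("emb_layers.1".toList, "time_emb_proj".toList), ("skip_connection".toList, "conv_shortcut".toList)] (pvRepl "in_layers.2".toList "conv1".toList (pvRepl "in_layers.0".toList "norm1".toList L)) = pvScan [("in_layers.2".toList, "conv1".toList), ("out_layers.0".toList, "norm2".toList), ("out_layers.3".toList, "conv2".toList), ("emb_layers.1".toList, "time_emb_proj".toList), ("skip_connection".toList, "conv_shortcut".toList)] (pvRepl "in_layers.0".toList "norm1".toList L) :=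
    pvMain "in_layers.2".toList "conv1".toList [("out_layers.0".toList, "norm2".toList), ("out_layers.3".toList, "conv2".toList), ("emb_layers.1".toList, "time_emb_proj".toList), ("skip_connection".toList, "conv_shortcut".toList)] (by decide) (by decide) (by decide) (by decide) (by decide)
      ((pvRepl "in_layers.0".toList "norm1".toList L)).length (pvRepl "in_layers.0".toList "norm1".toList L) le_rfl
      (by
      have hcw : pvCascWords "conv1".toList "in_layers.2".toList [("out_layers.0".toList, "norm2".toList), ("out_layers.3".toList, "conv2".toList), ("emb_layers.1".toList, "time_emb_proj".toList), ("skip_connection".toList, "conv_shortcut".toList)] = [] := by decide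
      intro w hw; rw [hcw] at hw; simp at hw)
  have e3 : pvScan [("out_layers.3".toList, "conv2".toList), ("emb_layers.1".toList, "time_emb_proj".toList), ("skip_connection".toList, "conv_shortcut".toList)] (pvRepl "out_layers.0".toList "norm2".toList (pvRepl "in_layers.2".toList "conv1".toList (pvRepl "in_layers.0".toList "norm1".toList L))) = pvScan [("out_layers.0".toList, "norm2".toList), ("out_layers.3".toList, "conv2".toList), ("emb_layers.1".toList, "time_emb_proj".toList), ("skip_connection".toList, "conv_shortcut".toList)] (pvRepl "in_layers.2".toList "conv1".toList (pvRepl "in_layers.0".toList "norm1".toList L)) :=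
    pvMain "out_layers.0".toList "norm2".toList [("out_layers.3".toList, "conv2".toList), ("emb_layers.1".toList, "time_emb_proj".toList), ("skip_connection".toList, "conv_shortcut".toList)] (by decide) (by decide) (by decide) (by decide) (by decide)
      ((pvRepl "in_layers.2".toList "conv1".toList (pvRepl "in_layers.0".toList "norm1".toList L))).length (pvRepl "in_layers.2".toList "conv1".toList (pvRepl "in_layers.0".toList "norm1".toList L)) le_rfl
      (by
      have hcw : pvCascWords "norm2".toList "out_layers.0".toList [("out_layers.3".toList, "conv2".toList), ("emb_layers.1".toList, "time_emb_proj".toList), ("skip_connection".toList, "conv_shortcut".toList)] = ["skip_connectioout_layers.0".toList] := by decide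
      intro w hw; rw [hcw] at hw; simp at hw; subst hw; exact hm2b)
  have e4 : pvScan [("emb_layers.1".toList, "time_emb_proj".toList), ("skip_connection".toList, "conv_shortcut".toList)] (pvRepl "out_layers.3".toList "conv2".toList (pvRepl "out_layers.0".toList "norm2".toList (pvRepl "in_layers.2".toList "conv1".toList (pvRepl "in_layers.0".toList "norm1".toList L)))) = pvScan [("out_layers.3".toList, "conv2".toList), ("emb_layers.1".toList, "time_emb_proj".toList), ("skip_connection".toList, "conv_shortcut".toList)] (pvRepl "out_layers.0".toList "norm2".toList (pvRepl "in_layers.2".toList "conv1".toList (pvRepl "in_layers.0".toList "norm1".toList L))) :=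
    pvMain "out_layers.3".toList "conv2".toList [("emb_layers.1".toList, "time_emb_proj".toList), ("skip_connection".toList, "conv_shortcut".toList)] (by decide) (by decide) (by decide) (by decide) (by decide)
      ((pvRepl "out_layers.0".toList "norm2".toList (pvRepl "in_layers.2".toList "conv1".toList (pvRepl "in_layers.0".toList "norm1".toList L)))).length (pvRepl "out_layers.0".toList "norm2".toList (pvRepl "in_layers.2".toList "conv1".toList (pvRepl "in_layers.0".toList "norm1".toList L))) le_rfl
      (by
      have hcw : pvCascWords "conv2".toList "out_layers.3".toList [("emb_layers.1".toList, "time_emb_proj".toList), ("skip_connection".toList, "conv_shortcut".toList)] = [] := by decide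
      intro w hw; rw [hcw] at hw; simp at hw)
  have e5 : pvScan [("skip_connection".toList, "conv_shortcut".toList)] (pvRepl "emb_layers.1".toList "time_emb_proj".toList (pvRepl "out_layers.3".toList "conv2".toList (pvRepl "out_layers.0".toList "norm2".toList (pvRepl "in_layers.2".toList "conv1".toList (pvRepl "in_layers.0".toList "norm1".toList L))))) = pvScan [("emb_layers.1".toList, "time_emb_proj".toList), ("skip_connection".toList, "conv_shortcut".toList)] (pvRepl "out_layers.3".toList "conv2".toList (pvRepl "out_layers.0".toList "norm2".toList (pvRepl "in_layers.2".toList "conv1".toList (pvRepl "in_layers.0".toList "norm1".toList L)))) :=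
    pvMain "emb_layers.1".toList "time_emb_proj".toList [("skip_connection".toList, "conv_shortcut".toList)] (by decide) (by decide) (by decide) (by decide) (by decide)
      ((pvRepl "out_layers.3".toList "conv2".toList (pvRepl "out_layers.0".toList "norm2".toList (pvRepl "in_layers.2".toList "conv1".toList (pvRepl "in_layers.0".toList "norm1".toList L))))).length (pvRepl "out_layers.3".toList "conv2".toList (pvRepl "out_layers.0".toList "norm2".toList (pvRepl "in_layers.2".toList "conv1".toList (pvRepl "in_layers.0".toList "norm1".toList L)))) le_rfl
      (by
      have hcw : pvCascWords "time_emb_proj".toList "emb_layers.1".toList [("skip_connection".toList, "conv_shortcut".toList)] = [] := by decide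
      intro w hw; rw [hcw] at hw; simp at hw)
  have e6 : pvScan [] (pvRepl "skip_connection".toList "conv_shortcut".toList (pvRepl "emb_layers.1".toList "time_emb_proj".toList (pvRepl "out_layers.3".toList "conv2".toList (pvRepl "out_layers.0".toList "norm2".toList (pvRepl "in_layers.2".toList "conv1".toList (pvRepl "in_layers.0".toList "norm1".toList L)))))) = pvScan [("skip_connection".toList, "conv_shortcut".toList)] (pvRepl "emb_layers.1".toList "time_emb_proj".toList (pvRepl "out_layers.3".toList "conv2".toList (pvRepl "out_layers.0".toList "norm2".toList (pvRepl "in_layers.2".toList "conv1".toList (pvRepl "in_layers.0".toList "norm1".toList L))))) :=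
    pvMain "skip_connection".toList "conv_shortcut".toList [] (by decide) (by decide) (by decide) (by decide) (by decide)
      ((pvRepl "emb_layers.1".toList "time_emb_proj".toList (pvRepl "out_layers.3".toList "conv2".toList (pvRepl "out_layers.0".toList "norm2".toList (pvRepl "in_layers.2".toList "conv1".toList (pvRepl "in_layers.0".toList "norm1".toList L)))))).length (pvRepl "emb_layers.1".toList "time_emb_proj".toList (pvRepl "out_layers.3".toList "conv2".toList (pvRepl "out_layers.0".toList "norm2".toList (pvRepl "in_layers.2".toList "conv1".toList (pvRepl "in_layers.0".toList "norm1".toList L))))) le_rfl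
      (by
      have hcw : pvCascWords "conv_shortcut".toList "skip_connection".toList [] = [] := by decide
      intro w hw; rw [hcw] at hw; simp at hw)
  have hmap : pvRenames.map (fun p => (p.1.toList, p.2.toList)) = [("in_layers.0".toList, "norm1".toList), ("in_layers.2".toList, "conv1".toList), ("out_layers.0".toList, "norm2".toList), ("out_layers.3".toList, "conv2".toList), ("emb_layers.1".toList, "time_emb_proj".toList), ("skip_connection".toList, "conv_shortcut".toList)] := by decide
  rw [hmap]
  calc (pvRepl "skip_connection".toList "conv_shortcut".toList (pvRepl "emb_layers.1".toList "time_emb_proj".toList (pvRepl "out_layers.3".toList "conv2".toList (pvRepl "out_layers.0".toList "norm2".toList (pvRepl "in_layers.2".toList "conv1".toList (pvRepl "in_layers.0".toList "norm1".toList L))))))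
      = pvScan [] (pvRepl "skip_connection".toList "conv_shortcut".toList (pvRepl "emb_layers.1".toList "time_emb_proj".toList (pvRepl "out_layers.3".toList "conv2".toList (pvRepl "out_layers.0".toList "norm2".toList (pvRepl "in_layers.2".toList "conv1".toList (pvRepl "in_layers.0".toList "norm1".toList L)))))) := (pvScan_nil _).symm
    _ = pvScan [("skip_connection".toList, "conv_shortcut".toList)] (pvRepl "emb_layers.1".toList "time_emb_proj".toList (pvRepl "out_layers.3".toList "conv2".toList (pvRepl "out_layers.0".toList "norm2".toList (pvRepl "in_layers.2".toList "conv1".toList (pvRepl "in_layers.0".toList "norm1".toList L))))) := e6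
    _ = pvScan [("emb_layers.1".toList, "time_emb_proj".toList), ("skip_connection".toList, "conv_shortcut".toList)] (pvRepl "out_layers.3".toList "conv2".toList (pvRepl "out_layers.0".toList "norm2".toList (pvRepl "in_layers.2".toList "conv1".toList (pvRepl "in_layers.0".toList "norm1".toList L)))) := e5
    _ = pvScan [("out_layers.3".toList, "conv2".toList), ("emb_layers.1".toList, "time_emb_proj".toList), ("skip_connection".toList, "conv_shortcut".toList)] (pvRepl "out_layers.0".toList "norm2".toList (pvRepl "in_layers.2".toList "conv1".toList (pvRepl "in_layers.0".toList "norm1".toList L))) := e4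
    _ = pvScan [("out_layers.0".toList, "norm2".toList), ("out_layers.3".toList, "conv2".toList), ("emb_layers.1".toList, "time_emb_proj".toList), ("skip_connection".toList, "conv_shortcut".toList)] (pvRepl "in_layers.2".toList "conv1".toList (pvRepl "in_layers.0".toList "norm1".toList L)) := e3
    _ = pvScan [("in_layers.2".toList, "conv1".toList), ("out_layers.0".toList, "norm2".toList), ("out_layers.3".toList, "conv2".toList), ("emb_layers.1".toList, "time_emb_proj".toList), ("skip_connection".toList, "conv_shortcut".toList)] (pvRepl "in_layers.0".toList "norm1".toList L) := e2
    _ = pvScan [("in_layers.0".toList, "norm1".toList), ("in_layers.2".toList, "conv1".toList), ("out_layers.0".toList, "norm2".toList), ("out_layers.3".toList, "conv2".toList), ("emb_layers.1".toList, "time_emb_proj".toList), ("skip_connection".toList, "conv_shortcut".toList)] L := e1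


theorem pvItemEq (s : String) (n : Int)
    (h1 : PySem.Str.isIn "skip_connectioin_layers.0" s = false)
    (h2 : PySem.Str.isIn "skip_connectioout_layers.0" s = false) :
    PySem.Str.replace (PySem.Str.replace (PySem.Str.replace (PySem.Str.replace (PySem.Str.replace (PySem.Str.replace s "in_layers.0" "norm1") "in_layers.2" "conv1") "out_layers.0" "norm2") "out_layers.3" "conv2") "emb_layers.1" "time_emb_proj") "skip_connection" "conv_shortcut" = pvRewrite s := by
  apply String.toList_inj.mp
  have h1' : ¬ ("skip_connectioin_layers.0".toList <:+: s.toList) :=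
    (PySem.Chars.isIn_eq_false_iff _ _).mp (by simpa using h1)
  have h2' : ¬ ("skip_connectioout_layers.0".toList <:+: s.toList) :=
    (PySem.Chars.isIn_eq_false_iff _ _).mp (by simpa using h2)
  simp only [PySem.Str.toList_replace]
  rw [pvReplace_eq_pvRepl "skip_connection".toList "conv_shortcut".toList (by decide)]
  rw [pvReplace_eq_pvRepl "emb_layers.1".toList "time_emb_proj".toList (by decide)]
  rw [pvReplace_eq_pvRepl "out_layers.3".toList "conv2".toList (by decide)]
  rw [pvReplace_eq_pvRepl "out_layers.0".toList "norm2".toList (by decide)]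
  rw [pvReplace_eq_pvRepl "in_layers.2".toList "conv1".toList (by decide)]
  rw [pvReplace_eq_pvRepl "in_layers.0".toList "norm1".toList (by decide)]
  rw [pvChainEq s.toList h1' h2']
  simp only [pvRewrite, String.toList_ofList]
  rw [pvScanGo_eq_pvScan _ _ _ le_rfl]


-- ===== VERDICT (by name: the statement is the Claim_ definition above) =====
theorem renew_resnet_paths_spec : Claim_equal_renew_resnet_paths := by
  intro old_list n hdom hpre
  unfold Spec_renew_resnet_paths renew_resnet_paths renew_resnet_paths_alt
  rw [PySem.List.foldl_append_singleton_eq_map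
    (f := fun old_item => [("old", old_item), ("new", pvShaveSegmentsA
      (PySem.Str.replace (PySem.Str.replace (PySem.Str.replace (PySem.Str.replace (PySem.Str.replace (PySem.Str.replace old_item "in_layers.0" "norm1") "in_layers.2" "conv1") "out_layers.0" "norm2") "out_layers.3" "conv2") "emb_layers.1" "time_emb_proj") "skip_connection" "conv_shortcut") n)])]
  simp only [List.nil_append]
  apply List.map_congr_left
  intro s hs
  obtain ⟨hs1, hs2⟩ := hpre s hs
  rw [pvItemEq s n hs1 hs2]
  rfl
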